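-- pv_equiv track=rewrite | github.com/Brunopezman/TP2-chats-de-whatsapp | chats_de_whatsapp.py | contar_repeticiones_palabra
-- ===== SOURCE A (Python) =====
-- def contar_repeticiones_palabra(palabras_usuario:str, frecuencia_palabras_por_contacto:dict) -> dict:
--     '''Cuenta la cantidad de apariciones de palabras segun cada contacto del archivo y las guarda en un diccionario.
--     Pre: Fue inicializada la funcion ingresar_palabras_a_contar() y recibe un archivo de convesaciones de android.
--     Post: Devuelve un diccionario con formato `contacto: {palabra: cantidad}`.
--     '''
--     cant_palabras_contacto = {}
--
--     for contacto, palabras_conversacion in frecuencia_palabras_por_contacto.items():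
--         cant_palabras_contacto[contacto] = {}
--         for palabra_usuario in palabras_usuario.lower().split(' '):
--             for palabras1, palabras_siguientes in palabras_conversacion.items():
--                 if palabras1.lower() == palabra_usuario:
--                     cant_palabras_contacto[contacto][palabra_usuario] = cant_palabras_contacto[contacto].get(palabra_usuario, 0) + 1
--                 for palabras2 in palabras_siguientes.keys():
--                     if palabras1.lower() == palabra_usuario or palabras2.lower() == palabra_usuario:
--                         cant_palabras_contacto[contacto][palabra_usuario] = cant_palabras_contacto[contacto].get(palabra_usuario, 0) + 1
--     return cant_palabras_contacto
-- ===== SOURCE B (Python) =====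
-- def contar_repeticiones_palabra(palabras_usuario: str, frecuencia_palabras_por_contacto: dict) -> dict:
--     '''Same result as A, but one pass per conversation: precompute, per contact, how many
--     increments each lowercased word would receive, then look each user word up once.'''
--     palabras = palabras_usuario.lower().split(' ')
--     resultado = {}
--     for contacto, conversacion in frecuencia_palabras_por_contacto.items():
--         incrementos = {}
--         for palabra1, siguientes in conversacion.items():
--             clave = palabra1.lower()
--             iguales = sum(1 for palabra2 in siguientes if palabra2.lower() == clave)
--             incrementos[clave] = incrementos.get(clave, 0) + 1 + len(siguientes) - iguales
--             for palabra2 in siguientes: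
--                 clave2 = palabra2.lower()
--                 incrementos[clave2] = incrementos.get(clave2, 0) + 1
--         conteo = {}
--         for palabra in palabras:
--             c = incrementos.get(palabra, 0)
--             if c:
--                 conteo[palabra] = conteo.get(palabra, 0) + c
--         resultado[contacto] = conteo
--     return resultado
-- ===== Notes on version B (the rewrite author's own statement) =====
-- stated objective: faster
-- what changed: Instead of re-scanning the whole conversation (pair dict plus all inner keys) once per user word, B builds one per-contact dictionary of increment counts in a single pass over the conversation and then answers each user word with one dictionary lookup.
import Mathlib
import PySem

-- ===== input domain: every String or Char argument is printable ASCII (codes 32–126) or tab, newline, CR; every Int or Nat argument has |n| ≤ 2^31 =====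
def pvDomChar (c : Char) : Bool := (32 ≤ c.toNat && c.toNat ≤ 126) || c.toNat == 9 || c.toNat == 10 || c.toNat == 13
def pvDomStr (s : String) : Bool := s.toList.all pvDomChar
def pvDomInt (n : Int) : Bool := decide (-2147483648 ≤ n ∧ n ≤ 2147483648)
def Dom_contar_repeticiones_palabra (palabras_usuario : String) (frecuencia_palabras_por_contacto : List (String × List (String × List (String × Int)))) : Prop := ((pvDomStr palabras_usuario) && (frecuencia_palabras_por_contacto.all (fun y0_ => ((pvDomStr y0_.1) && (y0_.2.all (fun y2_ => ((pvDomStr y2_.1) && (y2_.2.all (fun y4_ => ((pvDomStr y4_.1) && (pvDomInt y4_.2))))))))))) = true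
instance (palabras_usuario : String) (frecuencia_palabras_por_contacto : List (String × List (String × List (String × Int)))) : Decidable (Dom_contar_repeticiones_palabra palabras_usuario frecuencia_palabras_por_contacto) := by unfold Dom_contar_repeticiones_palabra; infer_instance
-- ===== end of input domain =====

-- ===== PORT A =====
-- B replaces A's per-word rescans of each conversation by one per-contact increment-count pass plus a lookup per user word (measurably faster); neither program mutates its arguments.
-- one '+1' applied to cuenta at key w: cant[contacto][w] = cant[contacto].get(w, 0) + 1
def pvA_bump (w : String) (cuenta : PySem.Dict String Int) : PySem.Dict String Int :=
  cuenta.insert w (cuenta.getD w 0 + 1)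

-- A's inner double loop over one conversation for one user word
def pvA_scan (w : String) (conv : List (String × List (String × Int)))
    (cuenta : PySem.Dict String Int) : PySem.Dict String Int :=
  conv.foldl (fun cuenta q =>
    let cuenta := if PySem.Str.lower q.1 == w then pvA_bump w cuenta else cuenta
    q.2.foldl (fun cuenta r =>
      if PySem.Str.lower q.1 == w || PySem.Str.lower r.1 == w then pvA_bump w cuenta else cuenta)
      cuenta) cuenta

def contar_repeticiones_palabra (palabras_usuario : String) (frecuencia_palabras_por_contacto : List (String × List (String × List (String × Int)))) : List (String × List (String × Int)) :=
  ((frecuencia_palabras_por_contacto.foldl (fun cant p =>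
      -- cant[contacto] = {}; then the word/conversation loops mutate cant[contacto] in place
      cant.insert p.1
        (((PySem.Str.split? (PySem.Str.lower palabras_usuario) " ").getD []).foldl
          (fun cuenta w => pvA_scan w p.2 cuenta) PySem.Dict.empty))
    (PySem.Dict.empty : PySem.Dict String (PySem.Dict String Int))).items).map
    (fun q => (q.1, q.2.items))

-- ===== PORT B =====
-- one pass over the conversation: how many increments each lowercased word receives
def pvB_incs (conv : List (String × List (String × Int))) : PySem.Dict String Int :=
  conv.foldl (fun incs q =>
    let clave := PySem.Str.lower q.1
    let iguales : Int := q.2.countP (fun r => PySem.Str.lower r.1 == clave)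
    let incs := incs.insert clave (incs.getD clave 0 + 1 + q.2.length - iguales)
    q.2.foldl (fun incs r =>
      let clave2 := PySem.Str.lower r.1
      incs.insert clave2 (incs.getD clave2 0 + 1)) incs) PySem.Dict.empty

-- then each user word is looked up once
def pvB_conteo (palabras : List String) (incs : PySem.Dict String Int) : PySem.Dict String Int :=
  palabras.foldl (fun conteo w =>
    let c := incs.getD w 0
    if c ≠ 0 then conteo.insert w (conteo.getD w 0 + c) else conteo) PySem.Dict.empty

def contar_repeticiones_palabra_alt (palabras_usuario : String) (frecuencia_palabras_por_contacto : List (String × List (String × List (String × Int)))) : List (String × List (String × Int)) :=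
  let palabras := (PySem.Str.split? (PySem.Str.lower palabras_usuario) " ").getD []
  (frecuencia_palabras_por_contacto.foldl (fun res p =>
      res.insert p.1 (pvB_conteo palabras (pvB_incs p.2)).items)
    (PySem.Dict.empty : PySem.Dict String (List (String × Int)))).items
-- ===== PRECONDITION & SPEC =====
def Spec_contar_repeticiones_palabra (palabras_usuario : String) (frecuencia_palabras_por_contacto : List (String × List (String × List (String × Int)))) (out : List (String × List (String × Int))) : Prop := out = contar_repeticiones_palabra_alt palabras_usuario frecuencia_palabras_por_contacto
instance (palabras_usuario : String) (frecuencia_palabras_por_contacto : List (String × List (String × List (String × Int)))) (out : List (String × List (String × Int))) : Decidable (Spec_contar_repeticiones_palabra palabras_usuario frecuencia_palabras_por_contacto out) := by unfold Spec_contar_repeticiones_palabra; infer_instance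

-- ===== CLAIM (what is proved, stated in full; the proofs are below) =====
def Claim_equal_contar_repeticiones_palabra : Prop := ∀ (palabras_usuario : String) (frecuencia_palabras_por_contacto : List (String × List (String × List (String × Int)))), Dom_contar_repeticiones_palabra palabras_usuario frecuencia_palabras_por_contacto → Spec_contar_repeticiones_palabra palabras_usuario frecuencia_palabras_por_contacto (contar_repeticiones_palabra palabras_usuario frecuencia_palabras_por_contacto)


-- ===== LEMMAS AND PROOFS =====

-- net effect on `cuenta` of n unit increments at key w
def pvAdd (w : String) (n : Nat) (c : PySem.Dict String Int) : PySem.Dict String Int :=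
  if n = 0 then c else c.insert w (c.getD w 0 + (n : Int))

-- number of increments A performs for word w at one conversation entry
def pvEntryInc (w : String) (q : String × List (String × Int)) : Nat :=
  (if PySem.Str.lower q.1 == w then 1 else 0) +
    q.2.countP (fun r => PySem.Str.lower q.1 == w || PySem.Str.lower r.1 == w)

-- number of increments A performs for word w over the whole conversation
def pvInc (w : String) (conv : List (String × List (String × Int))) : Nat :=
  (conv.map (pvEntryInc w)).sum

lemma pvAdd_pvAdd (w : String) (m n : Nat) (c : PySem.Dict String Int) :
    pvAdd w n (pvAdd w m c) = pvAdd w (m + n) c := by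
  by_cases hm : m = 0
  · simp [pvAdd, hm]
  · by_cases hn : n = 0
    · simp [pvAdd, hm, hn]
    · simp only [pvAdd, hm, hn, Nat.add_eq_zero_iff, false_and, if_false,
        PySem.Dict.getD_insert_self, PySem.Dict.insert_insert_self]
      congr 1
      push_cast
      ring

lemma pvA_bump_eq (w : String) (c : PySem.Dict String Int) : pvA_bump w c = pvAdd w 1 c := by
  simp [pvA_bump, pvAdd]

lemma fold_cond_bump {α : Type} (w : String) (l : List α) (p : α → Bool) :
    ∀ c : PySem.Dict String Int,
      l.foldl (fun c r => if p r then pvA_bump w c else c) c = pvAdd w (l.countP p) c := by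
  induction l with
  | nil => intro c; simp [pvAdd]
  | cons r l ih =>
    intro c
    rw [List.foldl_cons, List.countP_cons]
    by_cases h : p r = true
    · rw [if_pos h, ih, pvA_bump_eq, pvAdd_pvAdd]
      simp [h, Nat.add_comm]
    · rw [if_neg h, ih]
      simp [h]

lemma pvA_scan_eq (w : String) (conv : List (String × List (String × Int))) :
    ∀ c : PySem.Dict String Int, pvA_scan w conv c = pvAdd w (pvInc w conv) c := by
  induction conv with
  | nil => intro c; simp [pvA_scan, pvInc, pvAdd]
  | cons q conv ih =>
    intro c
    have hstep : (q.2.foldl (fun cuenta r =>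
        if PySem.Str.lower q.1 == w || PySem.Str.lower r.1 == w then pvA_bump w cuenta else cuenta)
        (if PySem.Str.lower q.1 == w then pvA_bump w c else c)) = pvAdd w (pvEntryInc w q) c := by
      by_cases h : (PySem.Str.lower q.1 == w) = true
      · rw [if_pos h, pvA_bump_eq, fold_cond_bump, pvAdd_pvAdd]
        simp [pvEntryInc, h, Nat.add_comm]
      · rw [if_neg h, fold_cond_bump]
        have h' : (PySem.Str.lower q.1 == w) = false := by simpa using h
        simp [pvEntryInc, h']
    have hunfold : pvA_scan w (q :: conv) c
        = pvA_scan w conv (q.2.foldl (fun cuenta r =>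
            if PySem.Str.lower q.1 == w || PySem.Str.lower r.1 == w then pvA_bump w cuenta else cuenta)
            (if PySem.Str.lower q.1 == w then pvA_bump w c else c)) := rfl
    rw [hunfold, hstep, ih, pvAdd_pvAdd]
    simp [pvInc]

-- B's counter holds, at every word, exactly A's increment count
lemma pvB_incs_getD_aux (w : String) (conv : List (String × List (String × Int))) :
    ∀ d : PySem.Dict String Int,
      (conv.foldl (fun incs q =>
        let clave := PySem.Str.lower q.1
        let iguales : Int := q.2.countP (fun r => PySem.Str.lower r.1 == clave)
        let incs := incs.insert clave (incs.getD clave 0 + 1 + q.2.length - iguales)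
        q.2.foldl (fun incs r =>
          let clave2 := PySem.Str.lower r.1
          incs.insert clave2 (incs.getD clave2 0 + 1)) incs) d).getD w 0
      = d.getD w 0 + (pvInc w conv : Int) := by
  induction conv with
  | nil => intro d; simp [pvInc]
  | cons q conv ih =>
    intro d
    have hinner : ∀ d0 : PySem.Dict String Int,
        (q.2.foldl (fun incs r =>
          let clave2 := PySem.Str.lower r.1
          incs.insert clave2 (incs.getD clave2 0 + 1)) d0).getD w 0
        = d0.getD w 0 + (q.2.countP (fun r => PySem.Str.lower r.1 == w) : Int) := by
      intro d0
      show (List.foldl (fun incs r =>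
          incs.insert (PySem.Str.lower r.1) (incs.getD (PySem.Str.lower r.1) 0 + 1)) d0 q.2).getD w 0 = _
      rw [← List.foldl_map (f := fun r : String × Int => PySem.Str.lower r.1)
            (g := fun (incs : PySem.Dict String Int) x => incs.insert x (incs.getD x 0 + 1)),
          PySem.Dict.getD_foldl_insert_add_one]
      congr 1
      rw [List.count_eq_countP, List.countP_map]
      rfl
    rw [List.foldl_cons, ih]
    have hq : ((fun (incs : PySem.Dict String Int) (q : String × List (String × Int)) =>
        let clave := PySem.Str.lower q.1
        let iguales : Int := q.2.countP (fun r => PySem.Str.lower r.1 == clave)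
        let incs := incs.insert clave (incs.getD clave 0 + 1 + q.2.length - iguales)
        q.2.foldl (fun incs r =>
          let clave2 := PySem.Str.lower r.1
          incs.insert clave2 (incs.getD clave2 0 + 1)) incs) d q).getD w 0
        = d.getD w 0 + (pvEntryInc w q : Int) := by
      show (List.foldl (fun incs r =>
          let clave2 := PySem.Str.lower r.1
          incs.insert clave2 (incs.getD clave2 0 + 1))
          (d.insert (PySem.Str.lower q.1)
            (d.getD (PySem.Str.lower q.1) 0 + 1 + (q.2.length : Int)
              - ((q.2.countP (fun r => PySem.Str.lower r.1 == PySem.Str.lower q.1) : Nat) : Int)))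
          q.2).getD w 0 = _
      rw [hinner, PySem.Dict.getD_insert]
      by_cases h : w = PySem.Str.lower q.1
      · have hbeq : (PySem.Str.lower q.1 == w) = true := by simp [h]
        rw [if_pos h]
        have hcnt : q.2.countP (fun r => PySem.Str.lower r.1 == PySem.Str.lower q.1)
            = q.2.countP (fun r => PySem.Str.lower r.1 == w) := by rw [h]
        have hentry : pvEntryInc w q = 1 + q.2.length := by
          simp [pvEntryInc, hbeq]
        rw [hcnt, hentry, h]
        push_cast
        ring
      · have hbeq : (PySem.Str.lower q.1 == w) = false := by
          simp [beq_eq_false_iff_ne, Ne.symm h]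
        rw [if_neg h]
        have hentry : pvEntryInc w q = q.2.countP (fun r =>
            PySem.Str.lower q.1 == w || PySem.Str.lower r.1 == w) := by
          simp [pvEntryInc, hbeq]
        rw [hentry]
        congr 2
        simp [hbeq]
    rw [hq]
    have : pvInc w (q :: conv) = pvEntryInc w q + pvInc w conv := by simp [pvInc]
    rw [this]
    push_cast
    ring

lemma pvB_incs_getD (w : String) (conv : List (String × List (String × Int))) :
    (pvB_incs conv).getD w 0 = (pvInc w conv : Int) := by
  have := pvB_incs_getD_aux w conv PySem.Dict.empty
  simpa [pvB_incs] using this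

-- per contact, A's word loop and B's lookup loop build the same dictionary
lemma pv_contact_eq (palabras : List String) (conv : List (String × List (String × Int))) :
    palabras.foldl (fun cuenta w => pvA_scan w conv cuenta) PySem.Dict.empty
    = pvB_conteo palabras (pvB_incs conv) := by
  unfold pvB_conteo
  apply PySem.List.foldl_congr_mem
  intro acc w _hw
  rw [pvA_scan_eq]
  show pvAdd w (pvInc w conv) acc
      = if (pvB_incs conv).getD w 0 ≠ 0 then acc.insert w (acc.getD w 0 + (pvB_incs conv).getD w 0) else acc
  rw [pvB_incs_getD]
  by_cases h : pvInc w conv = 0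
  · simp [pvAdd, h]
  · simp [pvAdd, h]

-- threading the per-contact equality through the outer fold, item lists included
lemma pv_outer_items {T : Type} (FA : T → PySem.Dict String Int) (FB : T → List (String × Int))
    (h : ∀ t, (FA t).items = FB t) (freq : List (String × T)) :
    ∀ (da : PySem.Dict String (PySem.Dict String Int)) (db : PySem.Dict String (List (String × Int))),
      db.items = da.items.map (fun q => (q.1, q.2.items)) →
      (freq.foldl (fun acc p => acc.insert p.1 (FA p.2)) da).items.map (fun q => (q.1, q.2.items))
      = (freq.foldl (fun acc p => acc.insert p.1 (FB p.2)) db).items := by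
  induction freq with
  | nil => intro da db hdb; simp [hdb]
  | cons p freq ih =>
    intro da db hdb
    rw [List.foldl_cons, List.foldl_cons]
    apply ih
    have hkeys : db.keys = da.keys := by
      simp only [PySem.Dict.keys, hdb, List.map_map]
      rfl
    have hc : db.contains p.1 = da.contains p.1 := by
      rw [PySem.Dict.contains_eq_decide_mem_keys, PySem.Dict.contains_eq_decide_mem_keys, hkeys]
    by_cases hcon : da.contains p.1 = true
    · rw [PySem.Dict.items_insert_of_contains _ _ (hc.trans hcon),
          PySem.Dict.items_insert_of_contains _ _ hcon, hdb, List.map_map, List.map_map]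
      apply List.map_congr_left
      intro pr _hpr
      by_cases hk : pr.1 = p.1
      · simp [hk, h p.2]
      · simp [hk]
    · have hcon' : da.contains p.1 = false := by simpa using hcon
      rw [PySem.Dict.items_insert_of_not_contains _ _ (hc.trans hcon'),
          PySem.Dict.items_insert_of_not_contains _ _ hcon', hdb, List.map_append]
      simp [h p.2]

-- ===== VERDICT (by name: the statement is the Claim_ definition above) =====
theorem contar_repeticiones_palabra_spec : Claim_equal_contar_repeticiones_palabra := by
  intro palabras_usuario freq _hdom
  unfold Spec_contar_repeticiones_palabra contar_repeticiones_palabra contar_repeticiones_palabra_alt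
  exact pv_outer_items
    (fun conv => ((PySem.Str.split? (PySem.Str.lower palabras_usuario) " ").getD []).foldl
      (fun cuenta w => pvA_scan w conv cuenta) PySem.Dict.empty)
    (fun conv => (pvB_conteo ((PySem.Str.split? (PySem.Str.lower palabras_usuario) " ").getD [])
      (pvB_incs conv)).items)
    (fun conv => congrArg PySem.Dict.items
      (pv_contact_eq ((PySem.Str.split? (PySem.Str.lower palabras_usuario) " ").getD []) conv))
    freq PySem.Dict.empty PySem.Dict.empty rfl
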